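-- pv_equiv track=rewrite | github.com/Slavicscheise/amis_python71 | km71/Soloviev_Vladislav/12/Task1.py | last_max
-- ===== SOURCE A (Python) =====
-- def last_max(list, n,i,lmax,max):
--     if(i==n):
--         return lmax
--     else:
--         if((int)(max)<(int)(list[i])):
--             lmax=max
--             max=list[i]
--         return last_max(list, n,i+1, lmax,max)
-- ===== SOURCE B (Python) =====
-- def last_max(list, n, i, lmax, max):
--     for j in range(i, n):
--         if int(max) < int(list[j]):
--             lmax, max = max, list[j]
--     return lmax
-- ===== Notes on version B (the rewrite author's own statement) =====
-- stated objective: idiomatic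
-- what changed: Replaces the tail recursion over (list, n, i, lmax, max) with a single for-loop over range(i, n) carrying (lmax, max) as loop state.
import Mathlib
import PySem

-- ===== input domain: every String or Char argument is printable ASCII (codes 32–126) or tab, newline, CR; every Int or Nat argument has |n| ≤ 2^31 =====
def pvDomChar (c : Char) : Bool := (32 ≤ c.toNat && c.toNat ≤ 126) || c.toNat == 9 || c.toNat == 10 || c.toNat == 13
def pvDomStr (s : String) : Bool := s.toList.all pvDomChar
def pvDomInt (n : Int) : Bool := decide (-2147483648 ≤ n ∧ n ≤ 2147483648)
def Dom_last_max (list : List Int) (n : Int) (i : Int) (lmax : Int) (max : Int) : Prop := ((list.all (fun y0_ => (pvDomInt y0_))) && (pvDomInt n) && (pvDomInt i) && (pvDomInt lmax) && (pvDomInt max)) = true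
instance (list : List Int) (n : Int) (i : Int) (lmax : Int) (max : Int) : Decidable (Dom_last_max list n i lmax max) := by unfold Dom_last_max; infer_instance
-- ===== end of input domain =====

-- B replaces A's tail recursion with a for-loop over range(i, n) carrying (lmax, max) as loop state (idiomatic; same cost).

-- ===== PORT A =====
-- A's recursion terminates (when it returns at all) after exactly (n - i) steps, so the
-- transliteration uses that as structural fuel; fuel 0 is reached exactly when i = n under
-- Pre_. The 'none' case of pyGet? is Python's IndexError, excluded by Pre_.
def last_max_go (list : List Int) (n : Int) : Nat → Int → Int → Int → Int
  | 0, _, lmax, _ => lmax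
  | f + 1, i, lmax, max =>
    if i = n then lmax
    else
      match PySem.List.pyGet? list i with
      | some v => if max < v then last_max_go list n f (i + 1) max v
                  else last_max_go list n f (i + 1) lmax max
      | none => lmax

def last_max (list : List Int) (n : Int) (i : Int) (lmax : Int) (max : Int) : Int :=
  last_max_go list n (n - i).toNat i lmax max

-- ===== PORT B =====
-- loop body of Source B: one step of 'if int(max) < int(list[j]): lmax, max = max, list[j]'
def lmStep (list : List Int) (st : Int × Int) (j : Int) : Int × Int :=
  match PySem.List.pyGet? list j with
  | some v => if st.2 < v then (st.2, v) else st
  | none => st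

def last_max_alt (list : List Int) (n : Int) (i : Int) (lmax : Int) (max : Int) : Int :=
  ((PySem.List.pyRange i n 1).foldl (lmStep list) (lmax, max)).1

-- ===== PRECONDITION & SPEC =====
-- Exactly where Python A returns: either i = n at once, or the scanned indices i..n-1 are
-- all valid Python indices of list (negative start indices wrap); otherwise A raises
-- IndexError (or RecursionError when n < i).
def Pre_last_max (list : List Int) (n : Int) (i : Int) (lmax : Int) (max : Int) : Prop :=
  i = n ∨ (i < n ∧ -(list.length : Int) ≤ i ∧ n ≤ (list.length : Int))
instance (list : List Int) (n : Int) (i : Int) (lmax : Int) (max : Int) : Decidable (Pre_last_max list n i lmax max) := by unfold Pre_last_max; infer_instance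

def pvWitness_last_max : List Int × Int × Int × Int × Int := ([3, 1, 4, 1, 5], 5, 0, 0, 0)

def Spec_last_max (list : List Int) (n : Int) (i : Int) (lmax : Int) (max : Int) (out : Int) : Prop := out = last_max_alt list n i lmax max
instance (list : List Int) (n : Int) (i : Int) (lmax : Int) (max : Int) (out : Int) : Decidable (Spec_last_max list n i lmax max out) := by unfold Spec_last_max; infer_instance

-- ===== CLAIM (what is proved, stated in full; the proofs are below) =====
def Claim_equal_last_max : Prop := ∀ (list : List Int) (n : Int) (i : Int) (lmax : Int) (max : Int), Dom_last_max list n i lmax max → Pre_last_max list n i lmax max → Spec_last_max list n i lmax max (last_max list n i lmax max)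

-- ===== LEMMAS AND PROOFS =====
lemma go_eq_foldl (list : List Int) (n : Int) :
    ∀ (f : Nat) (i lmax mx : Int), (n - i).toNat = f → i ≤ n →
      (i < n → -(list.length : Int) ≤ i ∧ n ≤ (list.length : Int)) →
      last_max_go list n f i lmax mx =
        ((PySem.List.pyRange i n 1).foldl (lmStep list) (lmax, mx)).1 := by
  intro f
  induction f with
  | zero =>
    intro i lmax mx hf hle _
    have hin : i = n := by omega
    subst hin
    rw [PySem.List.pyRange_one_eq_nil (le_refl i)]
    simp [last_max_go]
  | succ f ih =>
    intro i lmax mx hf hle hb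
    have hlt : i < n := by omega
    obtain ⟨hl, hr⟩ := hb hlt
    obtain ⟨v, hv⟩ : ∃ v, PySem.List.pyGet? list i = some v := by
      cases h : PySem.List.pyGet? list i with
      | none =>
        have := (PySem.List.pyGet?_eq_none_iff (xs := list) (i := i)).mp h
        exact absurd (by constructor <;> omega) this
      | some v => exact ⟨v, rfl⟩
    rw [PySem.List.pyRange_one_cons hlt, List.foldl_cons]
    have hne : i ≠ n := by omega
    have hstep : lmStep list (lmax, mx) i =
        if mx < v then (mx, v) else (lmax, mx) := by
      simp [lmStep, hv]
    rw [hstep]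
    show last_max_go list n (f + 1) i lmax mx = _
    rw [last_max_go, if_neg hne, hv]
    show (if mx < v then last_max_go list n f (i + 1) mx v
          else last_max_go list n f (i + 1) lmax mx) = _
    by_cases hc : mx < v
    · rw [if_pos hc, if_pos hc]
      exact ih (i + 1) mx v (by omega) (by omega) (fun h => ⟨by omega, hr⟩)
    · rw [if_neg hc, if_neg hc]
      exact ih (i + 1) lmax mx (by omega) (by omega) (fun h => ⟨by omega, hr⟩)

-- ===== VERDICT (by name: the statement is the Claim_ definition above) =====
theorem last_max_spec : Claim_equal_last_max := by
  intro list n i lmax max _ hpre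
  unfold Spec_last_max last_max last_max_alt
  rcases hpre with h | ⟨h1, h2, h3⟩
  · exact go_eq_foldl list n (n - i).toNat i lmax max rfl (le_of_eq h) (fun hlt => absurd h (by omega))
  · exact go_eq_foldl list n (n - i).toNat i lmax max rfl (le_of_lt h1) (fun _ => ⟨h2, h3⟩)
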